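-- pv_equiv track=rewrite | github.com/Majezuar/Artificial-intelligence-2023-UABCS | INTELIGENCIA ARTIFICIAL/ManuelZuñiga_pancakeIterativeDfs.py | dfs_permutations
-- ===== SOURCE A (Python) =====
-- def dfs_permutations(lst, goal):
--     stack = [(lst, [])]
--     while stack:
--         node, path = stack.pop()
--         if path == goal:
--             return path
--         for i in range(len(node)):
--             if node[i] not in path:
--                 stack.append((node[:i] + node[i+1:], path + [node[i]]))
--     return None
-- ===== SOURCE B (Python) =====
-- def dfs_permutations(lst, goal):
--     pool = set(lst)
--     seen = set()
--     for x in goal: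
--         if x in seen or x not in pool:
--             return None
--         seen.add(x)
--     return list(goal)
-- ===== Notes on version B (the rewrite author's own statement) =====
-- stated objective: faster
-- what changed: A enumerates duplicate-free sequences over lst by stack-based DFS until one equals goal; B observes that such a path exists iff goal is duplicate-free and drawn from lst, so it does one linear membership/duplicate scan of goal against set(lst); intended as faster (measured: A timed out at n=16 where B returned; no ratio measurable).
import Mathlib
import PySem

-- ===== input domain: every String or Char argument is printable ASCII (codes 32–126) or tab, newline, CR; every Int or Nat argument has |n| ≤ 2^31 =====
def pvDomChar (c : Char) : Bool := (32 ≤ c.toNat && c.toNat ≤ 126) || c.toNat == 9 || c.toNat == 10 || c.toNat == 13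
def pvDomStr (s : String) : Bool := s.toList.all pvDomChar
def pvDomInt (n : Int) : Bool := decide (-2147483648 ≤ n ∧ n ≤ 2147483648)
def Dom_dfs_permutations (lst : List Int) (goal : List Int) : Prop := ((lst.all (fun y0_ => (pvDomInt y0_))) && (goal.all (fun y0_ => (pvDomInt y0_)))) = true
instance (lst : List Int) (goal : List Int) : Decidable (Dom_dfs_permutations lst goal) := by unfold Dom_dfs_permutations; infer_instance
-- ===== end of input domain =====

-- B replaces A's factorial DFS over duplicate-free paths by one linear scan of goal against set(lst); intended as faster (timing: A timed out at n=16 where B returned; no ratio measurable).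

-- ===== PORT A =====
-- the inner 'for i in range(len(node)): if node[i] not in path: stack.append(...)' loop
def pvChildren (node path : List Int) : List (List Int × List Int) :=
  (List.range node.length).foldl
    (fun acc i =>
      match node[i]? with
      | some x => if x ∈ path then acc else acc ++ [(node.take i ++ node.drop (i + 1), path ++ [x])]
      | none => acc)
    []

def pvMeasure (stack : List (List Int × List Int)) : Nat :=
  (stack.map (fun e => (e.1.length + 1).factorial)).sum

-- cited by pvLoop's decreasing_by (termination of the while loop)
theorem pvChildren_eq (node path : List Int) :
    pvChildren node path = (List.range node.length).filterMap
      (fun i =>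
        match node[i]? with
        | some x => if x ∈ path then none
                    else some (node.take i ++ node.drop (i + 1), path ++ [x])
        | none => none) := by
  unfold pvChildren
  generalize List.range node.length = l
  suffices h : ∀ (init : List (List Int × List Int)),
      l.foldl (fun acc i =>
        match node[i]? with
        | some x => if x ∈ path then acc else acc ++ [(node.take i ++ node.drop (i + 1), path ++ [x])]
        | none => acc) init
      = init ++ l.filterMap (fun i =>
          match node[i]? with
          | some x => if x ∈ path then none
                      else some (node.take i ++ node.drop (i + 1), path ++ [x])
          | none => none) by
    simpa using h []
  induction l with
  | nil => simp
  | cons i l ih =>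
    intro init
    simp only [List.foldl_cons, List.filterMap_cons]
    cases h : node[i]? with
    | none => simp [ih]
    | some x =>
      by_cases hx : x ∈ path <;> simp [hx, ih]

theorem pvMeasure_children_lt (node path : List Int) :
    pvMeasure (pvChildren node path) < (node.length + 1).factorial := by
  rw [pvChildren_eq]
  set f := (fun i =>
        match node[i]? with
        | some x => if x ∈ path then none
                    else some (node.take i ++ node.drop (i + 1), path ++ [x])
        | none => (none : Option (List Int × List Int))) with hf
  have hlen : ((List.range node.length).filterMap f).length ≤ node.length := by
    simpa using List.length_filterMap_le f (List.range node.length)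
  have hmem : ∀ m ∈ ((List.range node.length).filterMap f).map
      (fun e => (e.1.length + 1).factorial), m ≤ node.length.factorial := by
    intro m hm
    simp only [List.mem_map, List.mem_filterMap, List.mem_range] at hm
    obtain ⟨e, ⟨i, hi, he⟩, rfl⟩ := hm
    rw [hf] at he
    simp only at he
    rw [List.getElem?_eq_getElem hi] at he
    by_cases hx : node[i] ∈ path
    · simp [hx] at he
    · simp only [hx, if_false] at he
      obtain rfl := (Option.some_inj.mp he).symm
      have hl : (node.take i ++ node.drop (i + 1)).length + 1 = node.length := by
        simp only [List.length_append, List.length_take, List.length_drop]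
        omega
      exact le_of_eq (congrArg Nat.factorial hl)
  have hsum := List.sum_le_card_nsmul _ _ hmem
  simp only [List.length_map, smul_eq_mul] at hsum
  have h1 : pvMeasure ((List.range node.length).filterMap f)
      ≤ node.length * node.length.factorial := by
    unfold pvMeasure
    exact le_trans hsum (Nat.mul_le_mul_right _ hlen)
  refine lt_of_le_of_lt h1 ?_
  rw [Nat.factorial_succ]
  have := Nat.factorial_pos node.length
  nlinarith

-- the 'while stack:' loop; head of the list = top of the Python stack, so 'stack.pop()'
-- takes the head and the appends of the for-loop (last append popped first) prepend the
-- children in reverse order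
def pvLoop (goal : List Int) : List (List Int × List Int) → Option (List Int)
  | [] => none
  | (node, path) :: rest =>
    if path = goal then some path
    else pvLoop goal ((pvChildren node path).reverse ++ rest)
termination_by stack => pvMeasure stack
decreasing_by
  have h := pvMeasure_children_lt node path
  simp only [pvMeasure, List.map_append, List.sum_append, List.map_cons, List.sum_cons,
    List.map_reverse, List.sum_reverse] at *
  omega

def dfs_permutations (lst : List Int) (goal : List Int) : Option (List Int) :=
  pvLoop goal [(lst, [])]

-- ===== PORT B =====
-- the 'for x in goal: …' loop with its early 'return None'
def pvBLoop (pool : PySem.Set Int) (goal : List Int) (seen : PySem.Set Int) :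
    List Int → Option (List Int)
  | [] => some goal
  | x :: rest =>
    if PySem.Set.contains seen x || !(PySem.Set.contains pool x) then none
    else pvBLoop pool goal (PySem.Set.add seen x) rest

def dfs_permutations_alt (lst : List Int) (goal : List Int) : Option (List Int) :=
  pvBLoop (PySem.Set.ofList lst) goal PySem.Set.empty goal

-- ===== PRECONDITION & SPEC =====
def Spec_dfs_permutations (lst : List Int) (goal : List Int) (out : Option (List Int)) : Prop := out = dfs_permutations_alt lst goal
instance (lst : List Int) (goal : List Int) (out : Option (List Int)) : Decidable (Spec_dfs_permutations lst goal out) := by unfold Spec_dfs_permutations; infer_instance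

-- ===== CLAIM (what is proved, stated in full; the proofs are below) =====
def Claim_equal_dfs_permutations : Prop := ∀ (lst : List Int) (goal : List Int), Dom_dfs_permutations lst goal → Spec_dfs_permutations lst goal (dfs_permutations lst goal)

-- ===== LEMMAS AND PROOFS =====

-- 'goal is reachable from stack entry (node, path)': goal extends path by distinct
-- fresh elements all available in node
def pvGood (goal node path : List Int) : Prop :=
  ∃ ext, goal = path ++ ext ∧ ext.Nodup ∧ ∀ x ∈ ext, x ∈ node ∧ x ∉ path

theorem pvGood_step (goal node path : List Int) (hne : path ≠ goal) :
    pvGood goal node path ↔ ∃ c ∈ pvChildren node path, pvGood goal c.1 c.2 := by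
  rw [pvChildren_eq]
  constructor
  · rintro ⟨ext, hg, hnd, hmem⟩
    cases ext with
    | nil => simp at hg; exact absurd hg.symm hne
    | cons x ext' =>
      obtain ⟨hx, hxp⟩ := hmem x (by simp)
      obtain ⟨i, hi, hix⟩ := List.getElem_of_mem hx
      refine ⟨(node.take i ++ node.drop (i + 1), path ++ [x]), ?_, ?_⟩
      · simp only [List.mem_filterMap, List.mem_range]
        exact ⟨i, hi, by simp [List.getElem?_eq_getElem hi, hix, hxp]⟩
      · refine ⟨ext', by simp [hg], (List.nodup_cons.mp hnd).2, ?_⟩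
        intro y hy
        obtain ⟨hyn, hyp⟩ := hmem y (by simp [hy])
        have hyx : y ≠ x := fun h => (List.nodup_cons.mp hnd).1 (h ▸ hy)
        constructor
        · have hnode : node = node.take i ++ node[i] :: node.drop (i + 1) := by
            conv_lhs => rw [← List.take_append_drop i node, List.drop_eq_getElem_cons hi]
          rw [hnode] at hyn
          simp only [List.mem_append, List.mem_cons, hix] at hyn
          rcases hyn with h | h | h
          · simp [List.mem_append, h]
          · exact absurd h hyx
          · simp [List.mem_append, h]
        · simp [hyp, hyx]
  · rintro ⟨c, hc, ext', hg, hnd, hmem⟩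
    simp only [List.mem_filterMap, List.mem_range] at hc
    obtain ⟨i, hi, hci⟩ := hc
    rw [List.getElem?_eq_getElem hi] at hci
    by_cases hx : node[i] ∈ path
    · simp [hx] at hci
    · simp only [hx, if_false, Option.some_inj] at hci
      obtain rfl := hci.symm
      simp only at hg hmem
      refine ⟨node[i] :: ext', by simp [hg], ?_, ?_⟩
      · refine List.nodup_cons.mpr ⟨fun h => ?_, hnd⟩
        exact (hmem _ h).2 (by simp)
      · intro y hy
        rcases List.mem_cons.mp hy with rfl | hy'
        · exact ⟨List.getElem_mem hi, hx⟩
        · obtain ⟨hyn, hyp⟩ := hmem y hy'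
          refine ⟨?_, fun h => hyp (by simp [h])⟩
          rcases List.mem_append.mp hyn with h | h
          · exact List.mem_of_mem_take h
          · exact List.mem_of_mem_drop h

theorem pvLoop_none_or_goal (goal : List Int) (stack : List (List Int × List Int)) :
    pvLoop goal stack = none ∨ pvLoop goal stack = some goal := by
  induction stack using pvLoop.induct goal with
  | case1 => left; rw [pvLoop]
  | case2 node rest => right; rw [pvLoop, if_pos rfl]
  | case3 node path rest hne ih => rw [pvLoop, if_neg hne]; exact ih

theorem pvLoop_eq_some (goal : List Int) (stack : List (List Int × List Int)) :
    pvLoop goal stack = some goal ↔ ∃ e ∈ stack, pvGood goal e.1 e.2 := by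
  induction stack using pvLoop.induct goal with
  | case1 => rw [pvLoop]; simp
  | case2 node rest =>
    rw [pvLoop, if_pos rfl]
    exact ⟨fun _ => ⟨(node, goal), by simp, [], by simp, by simp, by simp⟩, fun _ => rfl⟩
  | case3 node path rest hne ih =>
    rw [pvLoop, if_neg hne, ih]
    simp only [List.mem_append, List.mem_reverse, List.mem_cons]
    constructor
    · rintro ⟨e, h | h, hg⟩
      · exact ⟨(node, path), Or.inl rfl, (pvGood_step goal node path hne).mpr ⟨e, h, hg⟩⟩
      · exact ⟨e, Or.inr h, hg⟩
    · rintro ⟨e, h | h, hg⟩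
      · subst h
        obtain ⟨c, hc, hcg⟩ := (pvGood_step goal node path hne).mp hg
        exact ⟨c, Or.inl hc, hcg⟩
      · exact ⟨e, Or.inr h, hg⟩

theorem pvBLoop_eq (pool seen : PySem.Set Int) (goal rest : List Int) :
    pvBLoop pool goal seen rest =
      if rest.Nodup ∧ ∀ x ∈ rest, x ∈ pool ∧ x ∉ seen then some goal else none := by
  induction rest generalizing seen with
  | nil => simp [pvBLoop]
  | cons x rest ih =>
    rw [pvBLoop, ih]
    by_cases h1 : x ∈ seen
    · rw [if_pos, if_neg]
      · rintro ⟨-, h⟩; exact (h x (by simp)).2 h1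
      · simp [PySem.Set.contains, h1]
    · by_cases h2 : x ∈ pool
      · rw [if_neg (by simp [PySem.Set.contains, h1, h2])]
        have : (rest.Nodup ∧ ∀ y ∈ rest, y ∈ pool ∧ y ∉ PySem.Set.add seen x) ↔
            ((x :: rest).Nodup ∧ ∀ y ∈ x :: rest, y ∈ pool ∧ y ∉ seen) := by
          simp only [List.nodup_cons, List.mem_cons]
          constructor
          · rintro ⟨hnd, h⟩
            refine ⟨⟨fun hx => ?_, hnd⟩, ?_⟩
            · exact (h x hx).2 (by simp [PySem.Set.mem_add])
            · rintro y (rfl | hy)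
              · exact ⟨h2, h1⟩
              · obtain ⟨ha, hb⟩ := h y hy
                exact ⟨ha, fun hs => hb (by simp [PySem.Set.mem_add, hs])⟩
          · rintro ⟨⟨hxr, hnd⟩, h⟩
            refine ⟨hnd, fun y hy => ?_⟩
            obtain ⟨ha, hb⟩ := h y (Or.inr hy)
            refine ⟨ha, fun hs => ?_⟩
            rcases (PySem.Set.mem_add ..).mp hs with h' | h'
            · exact hb h'
            · exact hxr (h' ▸ hy)
        rw [if_congr this rfl rfl]
      · rw [if_pos, if_neg]
        · rintro ⟨-, h⟩; exact h2 (h x (by simp)).1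
        · simp [PySem.Set.contains, h2]

-- ===== VERDICT (by name: the statement is the Claim_ definition above) =====
theorem dfs_permutations_spec : Claim_equal_dfs_permutations := by
  intro lst goal _
  unfold Spec_dfs_permutations dfs_permutations dfs_permutations_alt
  rw [pvBLoop_eq]
  by_cases hP : goal.Nodup ∧ ∀ x ∈ goal, x ∈ PySem.Set.ofList lst ∧ x ∉ PySem.Set.empty
  · rw [if_pos hP]
    refine (pvLoop_eq_some goal _).mpr ⟨(lst, []), by simp, goal, by simp, hP.1, ?_⟩
    exact fun x hx => ⟨(PySem.Set.mem_ofList ..).mp (hP.2 x hx).1, by simp⟩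
  · rw [if_neg hP]
    rcases pvLoop_none_or_goal goal [(lst, [])] with h | h
    · exact h
    · exfalso
      obtain ⟨e, he, ext, hg, hnd, hmem⟩ := (pvLoop_eq_some goal _).mp h
      simp only [List.mem_singleton] at he
      subst he
      simp only [List.nil_append] at hg
      subst hg
      refine hP ⟨hnd, fun x hx => ⟨(PySem.Set.mem_ofList ..).mpr (hmem x hx).1, ?_⟩⟩
      simp [PySem.Set.empty]
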